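-- pv_equiv track=rewrite | github.com/weka511/dynamics | chaos_book/exercises/HenonInverseIteration.py | anymatch
-- ===== SOURCE A (Python) =====
-- def cycles_equal(c1,c2):
--     '''
--     Determine whether two strings are equal within a cyclic permutation.
--
--     Parameters:
--         c1   First string
--         c2   The other
--     '''
--     assert len(c1)==len(c2),'Strings should be same length'
--     if c1 == c2: return True
--     for i in range(1,len(c1)):
--         c = c1[i:] + c1[:i]
--         if c == c2: return True
--     return False
--
-- def anymatch(s,Factors):
--     '''
--     Verify that string can be broken into a set of substrings,
--     such that each substring matches every other to within a cyclic permutation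
--
--     Parameters:
--         s        The string
--         Factors  A list of all integers (m,k) such that m*k = len(s)
--     '''
--     def matches(sub_cycles):
--         for i in range(1,len(sub_cycles)):
--             if not cycles_equal(sub_cycles[0],sub_cycles[i]): return False
--         return True
--
--     def some_match(m,k):
--         if m==1: return False
--         sub_cycles=[]
--         for i in range(m):
--             sub_cycles.append(s[i*k:(i+1)*k])
--         return matches(sub_cycles)
--
--     for m,k in Factors:
--         if some_match(m,k):
--             return True
--     return False
-- ===== SOURCE B (Python) =====
-- def anymatch(s, Factors):
--     '''
--     Verify that string can be broken into a set of substrings,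
--     such that each substring matches every other to within a cyclic permutation.
--     Cyclic equality is tested by the doubling trick (c in first+first) instead
--     of enumerating rotations.
--     '''
--     for m, k in Factors:
--         if m == 1:
--             continue
--         first = s[:k]
--         doubled = first + first
--         if all(len(c) == len(first) and c in doubled
--                for c in (s[i * k:(i + 1) * k] for i in range(1, m))):
--             return True
--     return False
-- ===== Notes on version B (the rewrite author's own statement) =====
-- stated objective: faster
-- what changed: Cyclic equality of each chunk with the first is tested by the doubling trick (chunk in first+first, one substring search) instead of enumerating and comparing all k rotations, and chunks are compared lazily against the first chunk instead of materialising the whole chunk list first.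
-- outside the precondition, e.g. on anymatch('ab', [(3, 1)]): A returns False, B returns False
import Mathlib
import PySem

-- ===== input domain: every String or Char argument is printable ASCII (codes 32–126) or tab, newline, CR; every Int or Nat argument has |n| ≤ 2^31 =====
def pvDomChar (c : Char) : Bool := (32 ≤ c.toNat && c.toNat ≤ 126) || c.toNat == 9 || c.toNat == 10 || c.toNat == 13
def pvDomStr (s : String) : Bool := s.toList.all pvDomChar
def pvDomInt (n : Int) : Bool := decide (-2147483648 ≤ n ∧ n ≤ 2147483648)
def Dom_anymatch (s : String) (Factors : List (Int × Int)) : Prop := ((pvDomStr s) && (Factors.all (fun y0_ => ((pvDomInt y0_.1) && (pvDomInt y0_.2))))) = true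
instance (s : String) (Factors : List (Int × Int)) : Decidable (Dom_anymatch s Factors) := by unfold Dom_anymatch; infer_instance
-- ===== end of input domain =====

-- B replaces A's rotation enumeration per chunk by the doubling substring test (chunk in first+first) and drops the materialised chunk list; objective: faster.


-- ===== PORT A =====
-- c = c1[i:] + c1[:i]
def pvRot (c1 : List Char) (i : Int) : List Char :=
  PySem.List.slice c1 (some i) none ++ PySem.List.slice c1 none (some i)

-- 'for i in range(1, len(c1)): if c == c2: return True' / 'return False'
def cyclesEqualLoop (c1 c2 : List Char) : List Int → Bool
  | [] => false
  | i :: rest => if pvRot c1 i == c2 then true else cyclesEqualLoop c1 c2 rest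

def cyclesEqual (c1 c2 : List Char) : Bool :=
  -- Python's 'assert len(c1)==len(c2)' raises AssertionError on unequal lengths;
  -- such inputs are excluded by Pre_anymatch, the 'false' branch is unreachable there
  if c1.length == c2.length then
    if c1 == c2 then true
    else cyclesEqualLoop c1 c2 (PySem.List.pyRange 1 (c1.length : Int) 1)
  else false

-- 'for i in range(1, len(sub_cycles)): if not cycles_equal(...): return False' / 'return True'
def matchesLoop (subs : List (List Char)) : List Int → Bool
  | [] => true
  | i :: rest =>
    if !(cyclesEqual (PySem.List.pyGetD subs 0 []) (PySem.List.pyGetD subs i [])) then false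
    else matchesLoop subs rest

def matchesA (subs : List (List Char)) : Bool :=
  matchesLoop subs (PySem.List.pyRange 1 (subs.length : Int) 1)

def someMatch (s : List Char) (m k : Int) : Bool :=
  if m == 1 then false
  else
    matchesA ((PySem.List.pyRange 0 m 1).foldl
      (fun acc i => acc ++ [PySem.List.slice s (some (i * k)) (some ((i + 1) * k))]) [])

def anymatchLoop (s : List Char) : List (Int × Int) → Bool
  | [] => false
  | (m, k) :: rest => if someMatch s m k then true else anymatchLoop s rest

def anymatch (s : String) (Factors : List (Int × Int)) : Bool :=
  anymatchLoop s.toList Factors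

-- ===== PORT B =====
def anymatch_alt (s : String) (Factors : List (Int × Int)) : Bool :=
  Factors.any (fun p =>
    if p.1 == 1 then false
    else
      let first := PySem.List.slice s.toList none (some p.2)
      let doubled := first ++ first
      (PySem.List.pyRange 1 p.1 1).all (fun i =>
        let c := PySem.List.slice s.toList (some (i * p.2)) (some ((i + 1) * p.2))
        (c.length == first.length) && PySem.Chars.isIn c doubled))

-- ===== PRECONDITION & SPEC =====
-- Pre_ excludes Factors entries (m,k), m ≥ 2, with k < 0 or m*k > len(s) on a NON-EMPTY s: there
-- the chunks s[i*k:(i+1)*k] can have unequal lengths and A's assert raises AssertionError (except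
-- when an earlier pair of equal-length chunks already mismatches, where A returns False before
-- reaching the assert). The empty string never asserts (all chunks empty) and stays inside Pre_.
def Pre_anymatch (s : String) (Factors : List (Int × Int)) : Prop :=
  ∀ p ∈ Factors, 2 ≤ p.1 → (0 ≤ p.2 ∧ p.1 * p.2 ≤ (s.toList.length : Int)) ∨ s.toList = []
instance (s : String) (Factors : List (Int × Int)) : Decidable (Pre_anymatch s Factors) := by
  unfold Pre_anymatch; infer_instance

def pvWitness_anymatch : String × (List (Int × Int)) := ("abab", [(2, 2)])

def Spec_anymatch (s : String) (Factors : List (Int × Int)) (out : Bool) : Prop := out = anymatch_alt s Factors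
instance (s : String) (Factors : List (Int × Int)) (out : Bool) : Decidable (Spec_anymatch s Factors out) := by unfold Spec_anymatch; infer_instance

-- ===== CLAIM (what is proved, stated in full; the proofs are below) =====
def Claim_equal_anymatch : Prop := ∀ (s : String) (Factors : List (Int × Int)), Dom_anymatch s Factors → Pre_anymatch s Factors → Spec_anymatch s Factors (anymatch s Factors)

-- ===== LEMMAS AND PROOFS =====

theorem all_congr_mem {α : Type} {l : List α} {p q : α → Bool}
    (h : ∀ x ∈ l, p x = q x) : l.all p = l.all q := by
  induction l with
  | nil => rfl
  | cons x t ih => simp_all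

-- b is an infix of a ++ a iff b is a rotation of a (equal lengths assumed)
theorem infix_doubled_iff (a b : List Char) (h : b.length = a.length) :
    b <:+: a ++ a ↔ ∃ j : Nat, j ≤ a.length ∧ b = a.drop j ++ a.take j := by
  constructor
  · rintro ⟨t, p, htp⟩
    have hlen := congrArg List.length htp
    simp at hlen
    have hj : t.length ≤ a.length := by omega
    refine ⟨t.length, hj, ?_⟩
    have hdrop : (a ++ a).drop t.length = b ++ p := by
      rw [← htp, List.append_assoc, List.drop_left]
    rw [List.drop_append_of_le_length hj] at hdrop
    have hb : b = (a.drop t.length ++ a).take b.length := by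
      rw [hdrop, List.take_left']; rfl
    rw [hb, h, List.take_append, List.take_of_length_le (by simp), List.length_drop,
        Nat.sub_sub_self hj]
  · rintro ⟨j, hj, rfl⟩
    refine ⟨a.take j, a.drop j, ?_⟩
    conv_rhs => rw [← List.take_append_drop j a]
    simp only [List.append_assoc]

theorem cyclesEqualLoop_eq_any (c1 c2 : List Char) (L : List Int) :
    cyclesEqualLoop c1 c2 L = L.any (fun i => pvRot c1 i == c2) := by
  induction L with
  | nil => rfl
  | cons i rest ih =>
    simp only [cyclesEqualLoop, List.any_cons, ih]
    split_ifs with hh <;> simp_all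

-- the core: rotation enumeration equals the doubling substring test, for equal lengths
theorem cyclesEqual_eq_isIn (a b : List Char) (h : b.length = a.length) :
    cyclesEqual a b = PySem.Chars.isIn b (a ++ a) := by
  rw [Bool.eq_iff_iff, PySem.Chars.isIn_iff_infix, infix_doubled_iff a b h]
  unfold cyclesEqual
  rw [if_pos (by simp [h])]
  rw [cyclesEqualLoop_eq_any]
  constructor
  · intro hl
    split_ifs at hl with heq
    · exact ⟨0, by simp, by simp [← beq_iff_eq.mp heq]⟩
    · simp only [List.any_eq_true] at hl
      obtain ⟨i, hi, hrot⟩ := hl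
      rw [PySem.List.mem_pyRange_one] at hi
      have h0 : (0:Int) ≤ i := by omega
      refine ⟨i.toNat, by omega, ?_⟩
      simp only [pvRot, PySem.List.slice_from a h0, PySem.List.slice_to a h0] at hrot
      exact (beq_iff_eq.mp hrot).symm
  · rintro ⟨j, hj, rfl⟩
    by_cases heq : a = a.drop j ++ a.take j
    · rw [if_pos (by simp [← heq])]
    · have hne : j ≠ 0 ∧ j ≠ a.length := by
        constructor <;> rintro rfl <;> simp at heq
      rw [if_neg (by simpa using heq)]
      simp only [List.any_eq_true]
      refine ⟨(j : Int), ?_, ?_⟩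
      · rw [PySem.List.mem_pyRange_one]
        constructor <;> [omega; exact_mod_cast by omega]
      · simp [pvRot, PySem.List.slice_from a (by positivity : (0:Int) ≤ (j:Int)),
          PySem.List.slice_to a (by positivity : (0:Int) ≤ (j:Int))]

theorem matchesLoop_eq_all (subs : List (List Char)) (L : List Int) :
    matchesLoop subs L
      = L.all (fun i => cyclesEqual (PySem.List.pyGetD subs 0 []) (PySem.List.pyGetD subs i [])) := by
  induction L with
  | nil => rfl
  | cons i rest ih =>
    simp only [matchesLoop, List.all_cons, ih]
    split_ifs with hh <;> simp_all

theorem anymatchLoop_eq_any (s : List Char) (F : List (Int × Int)) :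
    anymatchLoop s F = F.any (fun p => someMatch s p.1 p.2) := by
  induction F with
  | nil => rfl
  | cons p rest ih =>
    obtain ⟨m, k⟩ := p
    simp only [anymatchLoop, List.any_cons, ih]
    split_ifs with hh <;> simp_all

-- 'for i in range(1, len(subs)): … subs[i] …' is an all over subs.drop 1
theorem all_pyRange_pyGetD (subs : List (List Char)) (g : List Char → Bool) :
    (PySem.List.pyRange 1 (subs.length : Int) 1).all (fun i => g (PySem.List.pyGetD subs i []))
      = (subs.drop 1).all g := by
  have hmap := PySem.List.map_pyGetD_pyRange' subs [] (by norm_num : (0:Int) ≤ 1)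
  have hall := List.all_map (f := fun j => PySem.List.pyGetD subs j [])
      (l := PySem.List.pyRange 1 (subs.length : Int) 1) (p := g)
  rw [hmap] at hall
  simp only [Function.comp_def] at hall
  rw [show (Int.toNat 1) = 1 from rfl] at hall
  exact hall.symm

-- chunk i of s for 0 ≤ i < m, 0 ≤ k, m*k ≤ len s : the slice is a take/drop of length exactly k
theorem chunk_eq (s : List Char) (m k i : Int) (hk : 0 ≤ k) (hi : 0 ≤ i) (him : i < m)
    (hmk : m * k ≤ (s.length : Int)) :
    PySem.List.slice s (some (i * k)) (some ((i + 1) * k))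
      = (s.drop (i * k).toNat).take k.toNat ∧
    (PySem.List.slice s (some (i * k)) (some ((i + 1) * k))).length = k.toNat := by
  have h0 : (0:Int) ≤ i * k := mul_nonneg hi hk
  have h1 : (0:Int) ≤ (i + 1) * k := mul_nonneg (by omega) hk
  have h2 : (i + 1) * k = i * k + k := by ring
  have h3 : (i + 1) * k ≤ (s.length : Int) :=
    le_trans (mul_le_mul_of_nonneg_right (by omega) hk) hmk
  have h4 : ((i + 1) * k).toNat = (i * k).toNat + k.toNat := by omega
  have h5 : (i * k).toNat + k.toNat ≤ s.length := by omega
  rw [PySem.List.slice_toNat s h0 h1, h4, Nat.add_sub_cancel_left]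
  refine ⟨rfl, ?_⟩
  simp only [List.length_take, List.length_drop]
  omega

theorem slice_nil (a? b? : Option Int) : PySem.List.slice ([] : List Char) a? b? = [] := by
  simp [PySem.List.slice]

theorem pyGetD_nil_elem (xs : List (List Char)) (i : Int) (h : ∀ x ∈ xs, x = ([] : List Char)) :
    PySem.List.pyGetD xs i [] = [] := by
  unfold PySem.List.pyGetD
  rcases hx : PySem.List.pyGet? xs i with _ | x
  · simp
  · simpa using h x (PySem.List.mem_of_pyGet?_eq_some xs hx)

theorem pyGetD_zero_cons (c : List Char) (rest : List (List Char)) :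
    PySem.List.pyGetD (c :: rest) 0 [] = c := by simp [pysem]

-- the per-factor equivalence, under Pre_'s side condition for that factor
theorem someMatch_eq (s : List Char) (m k : Int)
    (hpre : 2 ≤ m → (0 ≤ k ∧ m * k ≤ (s.length : Int)) ∨ s = []) :
    someMatch s m k
      = (if m == 1 then false
         else
           (PySem.List.pyRange 1 m 1).all (fun i =>
             ((PySem.List.slice s (some (i * k)) (some ((i + 1) * k))).length
                == (PySem.List.slice s none (some k)).length)
             && PySem.Chars.isIn (PySem.List.slice s (some (i * k)) (some ((i + 1) * k)))
                  (PySem.List.slice s none (some k) ++ PySem.List.slice s none (some k)))) := by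
  by_cases hm1 : m = 1
  · simp [someMatch, hm1]
  rw [if_neg (by simpa using hm1)]
  unfold someMatch
  rw [if_neg (by simpa using hm1)]
  by_cases hm0 : m ≤ 0
  · rw [PySem.List.pyRange_one_eq_nil hm0, PySem.List.pyRange_one_eq_nil (by omega)]
    simp [matchesA, matchesLoop, PySem.List.pyRange_one_eq_nil]
  have hm2 : 2 ≤ m := by omega
  rcases hpre hm2 with ⟨hk, hmk⟩ | hnil
  · rw [PySem.List.foldl_append_singleton_eq_map, List.nil_append,
        PySem.List.pyRange_one_cons (show (0:Int) < m by omega), List.map_cons]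
    have hA0 : PySem.List.slice s (some (0 * k)) (some ((0 + 1) * k)) = List.take k.toNat s := by
      rw [show (0:Int) * k = 0 by ring, show ((0:Int) + 1) * k = k by ring,
          PySem.List.slice_toNat s le_rfl hk]
      simp
    rw [hA0, show (0:Int) + 1 = 1 by ring]
    have hkle : k ≤ m * k := le_mul_of_one_le_left hk (by omega)
    have hlen0 : (List.take k.toNat s).length = k.toNat := by
      simp only [List.length_take]
      omega
    have hleni : ∀ i, 1 ≤ i → i < m →
        (PySem.List.slice s (some (i * k)) (some ((i + 1) * k))).length = k.toNat := by
      intro i h1 h2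
      exact (chunk_eq s m k i hk (by omega) h2 hmk).2
    unfold matchesA
    rw [matchesLoop_eq_all]
    simp only [pyGetD_zero_cons]
    rw [all_pyRange_pyGetD _ (fun c => cyclesEqual (List.take k.toNat s) c),
        List.drop_one, List.tail_cons, List.all_map]
    rw [PySem.List.slice_to s hk]
    apply all_congr_mem
    intro i hi
    rw [PySem.List.mem_pyRange_one] at hi
    simp only [Function.comp_apply]
    rw [cyclesEqual_eq_isIn _ _ (by rw [hleni i hi.1 hi.2, hlen0])]
    simp [hleni i hi.1 hi.2, hlen0]
  · subst hnil
    rw [PySem.List.foldl_append_singleton_eq_map, List.nil_append]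
    unfold matchesA
    rw [matchesLoop_eq_all]
    simp only [slice_nil]
    have hall : ∀ i : Int,
        PySem.List.pyGetD ((PySem.List.pyRange 0 m 1).map (fun _ => ([] : List Char))) i [] = [] := by
      intro i
      refine pyGetD_nil_elem _ _ ?_
      intro x hx
      rw [List.mem_map] at hx
      obtain ⟨_, _, hxe⟩ := hx
      exact hxe.symm
    simp only [hall]
    simp [show cyclesEqual ([] : List Char) [] = true from rfl, PySem.Chars.isIn_nil]
    rw [show max m 0 = m from by omega]


-- ===== VERDICT (by name: the statement is the Claim_ definition above) =====
theorem anymatch_spec : Claim_equal_anymatch := by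
  intro s Factors _hdom hpre
  unfold Spec_anymatch anymatch anymatch_alt
  rw [anymatchLoop_eq_any]
  apply PySem.List.any_congr_mem
  intro p hp
  rw [someMatch_eq s.toList p.1 p.2 (fun h2 => hpre p hp h2)]
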